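-- pv_equiv track=rewrite | github.com/eshun4/FundamentalCodingInterviewPrep | 07/consecetive_letters.py | count_consecjutive_letters_vowel
-- ===== SOURCE A (Python) =====
-- def count_consecjutive_letters_vowel(str_inp):
--     """This function counts the number of consecutive letters in the string input provided."""
--     # Create a variable to store all the vowels
--     vowels = "aeiouAEIOU"
--     # Create a variable to store the count of consecutive letters
--     consecutive_vowel_let_count = 0
--     # Create another variable to keep track of the previous letter
--     prev_letter = None
--     # Iterate through each letter in the string
--     for lett in str_inp:
--         if prev_letter == lett and prev_letter in vowels and lett in vowels:
--              consecutive_vowel_let_count += 1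
--         prev_letter = lett
--     # Return the consecutive letter count
--     return  consecutive_vowel_let_count
-- ===== SOURCE B (Python) =====
-- def count_consecjutive_letters_vowel(str_inp):
--     """Run-length scan: advance over each maximal run of equal chars; a vowel run of length L adds L-1."""
--     vowels = "aeiouAEIOU"
--     total = 0
--     i = 0
--     n = len(str_inp)
--     while i < n:
--         ch = str_inp[i]
--         j = i + 1
--         while j < n and str_inp[j] == ch:
--             j += 1
--         if ch in vowels:
--             total += (j - i) - 1
--         i = j
--     return total
-- ===== Notes on version B (the rewrite author's own statement) =====
-- stated objective: alternative
-- what changed: Replaced the prev-letter pairwise comparison with a run-length scan over maximal runs of equal characters, adding length-1 per vowel run.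
import Mathlib
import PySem

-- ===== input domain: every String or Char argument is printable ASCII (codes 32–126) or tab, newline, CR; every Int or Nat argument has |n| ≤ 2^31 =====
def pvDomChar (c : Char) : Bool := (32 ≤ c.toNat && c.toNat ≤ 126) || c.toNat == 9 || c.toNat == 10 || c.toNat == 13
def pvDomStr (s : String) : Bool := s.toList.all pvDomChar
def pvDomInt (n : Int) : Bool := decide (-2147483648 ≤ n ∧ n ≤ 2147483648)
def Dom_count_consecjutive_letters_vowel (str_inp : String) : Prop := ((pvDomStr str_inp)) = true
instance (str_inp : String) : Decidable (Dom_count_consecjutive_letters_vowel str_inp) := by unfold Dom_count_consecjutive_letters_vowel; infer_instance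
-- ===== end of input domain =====

-- B replaces A's prev-letter pairwise comparison with a run-length scan over maximal runs (alternative decomposition, same cost).

-- ===== PORT A =====
def pvVowels : List Char := "aeiouAEIOU".toList

-- 'prev_letter in vowels' with prev_letter possibly None; Python short-circuits before
-- evaluating it when prev_letter != lett, so the 'none' branch is never semantically reached.
def pvPrevInVowels : Option Char → Bool
  | none => false
  | some p => pvVowels.contains p

def pvALoop : List Char → Option Char → Int → Int
  | [], _, cnt => cnt
  | l :: ls, prev, cnt =>
      pvALoop ls (some l)
        (if prev == some l && pvPrevInVowels prev && pvVowels.contains l then cnt + 1 else cnt)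

def count_consecjutive_letters_vowel (str_inp : String) : Int :=
  pvALoop str_inp.toList none 0

-- ===== PORT B =====
-- outer while: take one maximal run (inner while = takeWhile over equal chars), add len-1 if vowel, continue after the run
def pvBLoop : List Char → Int → Int
  | [], _total => _total
  | c :: cs, total =>
      pvBLoop (cs.dropWhile (· == c))
        (if pvVowels.contains c then total + ((1 + (cs.takeWhile (· == c)).length : Int) - 1) else total)
termination_by l total => l.length
decreasing_by
  simpa using Nat.lt_succ_of_le (List.length_dropWhile_le _ _)

def count_consecjutive_letters_vowel_alt (str_inp : String) : Int :=
  pvBLoop str_inp.toList 0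

-- ===== CLAIM (what is proved, stated in full; the proofs are below) =====
def Spec_count_consecjutive_letters_vowel (str_inp : String) (out : Int) : Prop := out = count_consecjutive_letters_vowel_alt str_inp
instance (str_inp : String) (out : Int) : Decidable (Spec_count_consecjutive_letters_vowel str_inp out) := by unfold Spec_count_consecjutive_letters_vowel; infer_instance

def Claim_equal_count_consecjutive_letters_vowel : Prop := ∀ (str_inp : String), Dom_count_consecjutive_letters_vowel str_inp → Spec_count_consecjutive_letters_vowel str_inp (count_consecjutive_letters_vowel str_inp)

-- ===== LEMMAS AND PROOFS =====

-- pair count starting from a known previous character p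
def pvCF : Char → List Char → Int
  | _, [] => 0
  | p, x :: xs => (if x = p ∧ x ∈ pvVowels then 1 else 0) + pvCF x xs

-- value of A on a full list
def pvAVal : List Char → Int
  | [] => 0
  | x :: xs => pvCF x xs

lemma pvALoop_some (ls : List Char) : ∀ (p : Char) (cnt : Int),
    pvALoop ls (some p) cnt = cnt + pvCF p ls := by
  induction ls with
  | nil => intro p cnt; simp [pvALoop, pvCF]
  | cons x xs ih =>
    intro p cnt
    simp only [pvALoop, pvCF, ih]
    by_cases hx : x = p
    · subst hx
      by_cases hv : x ∈ pvVowels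
      · simp [pvPrevInVowels, hv]; ring
      · have hc : pvVowels.contains x = false := by
          simpa [List.contains_iff_mem] using hv
        simp [pvPrevInVowels, hv]
    · have hb : (some p == some x) = false := by
        simp; exact fun hpx => hx hpx.symm
      simp [hb, hx]

lemma pvA_eq_AVal (l : List Char) : pvALoop l none 0 = pvAVal l := by
  cases l with
  | nil => simp [pvALoop, pvAVal]
  | cons x xs =>
    simp [pvALoop, pvAVal, pvPrevInVowels, pvALoop_some]

lemma pvCF_run (cs : List Char) : ∀ (c : Char),
    pvCF c cs = (if c ∈ pvVowels then ((cs.takeWhile (· == c)).length : Int) else 0)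
      + pvAVal (cs.dropWhile (· == c)) := by
  induction cs with
  | nil => intro c; simp [pvCF, pvAVal]
  | cons x xs ih =>
    intro c
    by_cases hx : x = c
    · subst hx
      simp only [List.takeWhile, List.dropWhile, beq_self_eq_true, pvCF, ih x]
      by_cases hv : x ∈ pvVowels
      · simp [hv]; ring
      · simp [hv]
    · have hbe : (x == c) = false := by simp [hx]
      simp [List.takeWhile, List.dropWhile, hbe, pvCF, pvAVal, hx]

lemma pvBLoop_eq_aux (n : Nat) : ∀ (l : List Char), l.length ≤ n →
    ∀ (total : Int), pvBLoop l total = total + pvAVal l := by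
  induction n with
  | zero =>
    intro l hl total
    have : l = [] := List.eq_nil_of_length_eq_zero (Nat.le_zero.mp hl)
    subst this; simp [pvBLoop, pvAVal]
  | succ n ih =>
    intro l hl total
    cases l with
    | nil => simp [pvBLoop, pvAVal]
    | cons c cs =>
      rw [pvBLoop, ih (cs.dropWhile (· == c))
        (le_trans (List.length_dropWhile_le _ _) (Nat.le_of_succ_le_succ hl))]
      rw [show pvAVal (c :: cs) = pvCF c cs from rfl, pvCF_run cs c]
      by_cases hv : c ∈ pvVowels
      · simp [hv]; ring
      · simp [hv]

lemma pvBLoop_eq (l : List Char) (total : Int) : pvBLoop l total = total + pvAVal l :=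
  pvBLoop_eq_aux l.length l (Nat.le_refl _) total

-- ===== VERDICT (by name: the statement is the Claim_ definition above) =====
theorem count_consecjutive_letters_vowel_spec : Claim_equal_count_consecjutive_letters_vowel := by
  intro s _
  unfold Spec_count_consecjutive_letters_vowel count_consecjutive_letters_vowel count_consecjutive_letters_vowel_alt
  rw [pvA_eq_AVal, pvBLoop_eq]
  simp
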